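-- pv_equiv track=rewrite | github.com/neocpx/2048 | logic.py | compact_and_merge
-- ===== SOURCE A (Python) =====
-- def compact_and_merge(line):
--     """Compact the line by removing zeros and merge adjacent equal tiles."""
--     compacted_line = [tile for tile in line if tile != 0]
--     merged_line = []
--     i = 0
--     while i < len(compacted_line) - 1:
--         if compacted_line[i] == compacted_line[i + 1]:
--             merged_line.append(compacted_line[i] * 2)
--             i += 1
--         else:
--             merged_line.append(compacted_line[i])
--         i += 1
--     if i == len(compacted_line) - 1:
--         merged_line.append(compacted_line[i])
--
--     # Fill the remaining spaces with zeros
--     merged_line += [0] * (len(line) - len(merged_line))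
--
--     return merged_line
-- ===== SOURCE B (Python) =====
-- def compact_and_merge(line):
--     """Single pass: skip zeros, merge with a backward-looking 'prev' sentinel."""
--     merged = []
--     prev = None
--     for tile in line:
--         if tile == 0:
--             continue
--         if tile == prev:
--             merged[-1] = tile * 2
--             prev = None
--         else:
--             merged.append(tile)
--             prev = tile
--     merged.extend([0] * (len(line) - len(merged)))
--     return merged
-- ===== Notes on version B (the rewrite author's own statement) =====
-- stated objective: simpler
-- what changed: Replaces A's build-compacted-list-then-index-walk with forward peek-ahead by a single pass over the original line that skips zeros inline and merges backward into the last kept tile via a reset 'prev' sentinel (no intermediate compacted list, no index arithmetic).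
import Mathlib
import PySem

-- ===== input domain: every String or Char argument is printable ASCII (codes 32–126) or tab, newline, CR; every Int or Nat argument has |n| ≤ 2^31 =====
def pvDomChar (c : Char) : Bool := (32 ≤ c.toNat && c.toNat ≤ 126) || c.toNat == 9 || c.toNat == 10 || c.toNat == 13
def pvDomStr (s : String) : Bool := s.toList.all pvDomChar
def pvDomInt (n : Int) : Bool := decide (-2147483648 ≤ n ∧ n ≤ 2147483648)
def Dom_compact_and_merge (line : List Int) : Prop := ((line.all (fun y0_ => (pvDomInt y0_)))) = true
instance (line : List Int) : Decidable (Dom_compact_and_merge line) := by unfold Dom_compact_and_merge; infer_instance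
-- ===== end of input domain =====

-- B replaces A's compacted-list + index-walk with forward peek-ahead by a single pass
-- that skips zeros inline and merges backward via a reset 'prev' sentinel (simpler).


-- ===== PORT A =====
-- A's while loop over indices; c.getD i 0 is safe since every access is in range.
def pvLoopA (c : List Int) (merged : List Int) (i : Nat) : List Int :=
  if i + 1 < c.length then
    if c.getD i 0 = c.getD (i + 1) 0 then
      pvLoopA c (merged ++ [c.getD i 0 * 2]) (i + 2)
    else
      pvLoopA c (merged ++ [c.getD i 0]) (i + 1)
  else if i + 1 = c.length then merged ++ [c.getD i 0]
  else merged
termination_by c.length - i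

def compact_and_merge (line : List Int) : List Int :=
  let compacted := line.filter (fun tile => tile ≠ 0)
  let merged := pvLoopA compacted [] 0
  merged ++ List.replicate (line.length - merged.length) 0

-- ===== PORT B =====
-- Source B's loop body: skip zeros; merge into the last kept tile when equal to prev.
def pvStepB (st : List Int × Option Int) (tile : Int) : List Int × Option Int :=
  if tile = 0 then st
  else if st.2 = some tile then (st.1.dropLast ++ [tile * 2], none)
  else (st.1 ++ [tile], some tile)

def compact_and_merge_alt (line : List Int) : List Int :=
  let merged := (line.foldl pvStepB ([], none)).1
  merged ++ List.replicate (line.length - merged.length) 0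

-- ===== PRECONDITION & SPEC =====
def Spec_compact_and_merge (line : List Int) (out : List Int) : Prop := out = compact_and_merge_alt line
instance (line : List Int) (out : List Int) : Decidable (Spec_compact_and_merge line out) := by unfold Spec_compact_and_merge; infer_instance

-- ===== CLAIM (what is proved, stated in full; the proofs are below) =====
def Claim_equal_compact_and_merge : Prop := ∀ (line : List Int), Dom_compact_and_merge line → Spec_compact_and_merge line (compact_and_merge line)

-- ===== LEMMAS AND PROOFS =====

-- Reference merge: the common value of both loops on a zero-free list.
def pvMerge : List Int → List Int
  | [] => []
  | [a] => [a]
  | a :: b :: rest => if a = b then a * 2 :: pvMerge rest else a :: pvMerge (b :: rest)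

lemma pvLoopA_eq (n : Nat) : ∀ (c merged : List Int) (i : Nat), c.length - i ≤ n →
    pvLoopA c merged i = merged ++ pvMerge (c.drop i) := by
  induction n with
  | zero =>
    intro c merged i h
    have hi : c.length ≤ i := by omega
    rw [pvLoopA, if_neg (by omega), if_neg (by omega), List.drop_eq_nil_of_le hi]
    simp [pvMerge]
  | succ n ih =>
    intro c merged i h
    rw [pvLoopA]
    by_cases h1 : i + 1 < c.length
    · have hi : i < c.length := by omega
      have hd1 : c.drop i = c.getD i 0 :: c.drop (i + 1) := by
        rw [List.getD_eq_getElem c 0 hi]; exact List.drop_eq_getElem_cons hi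
      have hd2 : c.drop (i + 1) = c.getD (i + 1) 0 :: c.drop (i + 2) := by
        rw [List.getD_eq_getElem c 0 h1]; exact List.drop_eq_getElem_cons h1
      rw [if_pos h1]
      by_cases he : c.getD i 0 = c.getD (i + 1) 0
      · rw [if_pos he, ih c _ (i + 2) (by omega), hd1, hd2, pvMerge, if_pos he]
        simp
      · rw [if_neg he, ih c _ (i + 1) (by omega), hd1, hd2, pvMerge, if_neg he, ← hd2]
        simp
    · rw [if_neg h1]
      by_cases h2 : i + 1 = c.length
      · have hi : i < c.length := by omega
        have hd1 : c.drop i = c.getD i 0 :: c.drop (i + 1) := by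
          rw [List.getD_eq_getElem c 0 hi]; exact List.drop_eq_getElem_cons hi
        rw [if_pos h2, hd1, List.drop_eq_nil_of_le (by omega), pvMerge]
      · rw [if_neg h2, List.drop_eq_nil_of_le (by omega)]
        simp [pvMerge]

-- pvStepB is the identity on zero tiles, so folding over l equals folding over its nonzeros.
lemma foldB_filter : ∀ (l : List Int) (st : List Int × Option Int),
    l.foldl pvStepB st = (l.filter (fun tile => tile ≠ 0)).foldl pvStepB st := by
  intro l
  induction l with
  | nil => intro st; rfl
  | cons t rest ih =>
    intro st
    by_cases h : t = 0
    · simp [h, List.foldl, pvStepB, ih]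
    · simp [h, List.foldl, ih]

lemma foldB_spec : ∀ (l : List Int), (∀ t ∈ l, t ≠ 0) → ∀ (acc : List Int),
    ((l.foldl pvStepB (acc, none)).1 = acc ++ pvMerge l) ∧
    (∀ p : Int, (l.foldl pvStepB (acc ++ [p], some p)).1 = acc ++ pvMerge (p :: l)) := by
  intro l
  induction l with
  | nil => intro _ acc; exact ⟨by simp [pvMerge], fun p => by simp [pvMerge]⟩
  | cons t rest ih =>
    intro hnz acc
    have ht : t ≠ 0 := hnz t (by simp)
    have hrest : ∀ x ∈ rest, x ≠ 0 := fun x hx => hnz x (by simp [hx])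
    constructor
    · show ((rest.foldl pvStepB (pvStepB (acc, none) t)).1 = _)
      rw [show pvStepB (acc, none) t = (acc ++ [t], some t) by simp [pvStepB, ht]]
      rcases rest with _ | ⟨u, rest'⟩
      · simp [pvMerge]
      · exact (ih hrest acc).2 t
    · intro p
      show ((rest.foldl pvStepB (pvStepB (acc ++ [p], some p) t)).1 = _)
      by_cases he : p = t
      · subst he
        rw [show pvStepB (acc ++ [p], some p) p = (acc ++ [p * 2], none) by
          simp [pvStepB, ht]]
        rw [(ih hrest (acc ++ [p * 2])).1, pvMerge, if_pos rfl]
        simp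
      · rw [show pvStepB (acc ++ [p], some p) t = ((acc ++ [p]) ++ [t], some t) by
          simp [pvStepB, ht, he]]
        rw [(ih hrest (acc ++ [p])).2 t, pvMerge, if_neg he]
        simp

-- ===== VERDICT (by name: the statement is the Claim_ definition above) =====
theorem compact_and_merge_spec : Claim_equal_compact_and_merge := by
  intro line _
  show compact_and_merge line = compact_and_merge_alt line
  simp only [compact_and_merge, compact_and_merge_alt]
  have hnz : ∀ t ∈ line.filter (fun tile => tile ≠ 0), t ≠ 0 := by
    intro t ht
    simpa using (List.of_mem_filter ht)
  have hA := pvLoopA_eq (line.filter (fun tile => tile ≠ 0)).length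
      (line.filter (fun tile => tile ≠ 0)) [] 0 (by omega)
  have hB := foldB_filter line ([], none)
  have hB2 := (foldB_spec (line.filter (fun tile => tile ≠ 0)) hnz []).1
  simp only [List.drop_zero, List.nil_append] at hA
  rw [hA, hB, hB2]
  simp
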